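-- pv_equiv track=rewrite | github.com/Dirac-sn/project-1 | lab2_10 jan.py | N_list
-- ===== SOURCE A (Python) =====
-- def N_list(init,n):
--     N = []
--     i = 0
--     while i < n:
--          z = 2*init
--          init = z
--          N.append(z)
--          i = i+1
--     return N
-- ===== SOURCE B (Python) =====
-- def N_list(init, n):
--     return [init << (i + 1) for i in range(n)]
-- ===== Notes on version B (the rewrite author's own statement) =====
-- stated objective: idiomatic
-- what changed: Replaces the while-loop that mutates a running doubled accumulator with a single comprehension computing each element directly from its index as a left shift init << (i+1).
import Mathlib
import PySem

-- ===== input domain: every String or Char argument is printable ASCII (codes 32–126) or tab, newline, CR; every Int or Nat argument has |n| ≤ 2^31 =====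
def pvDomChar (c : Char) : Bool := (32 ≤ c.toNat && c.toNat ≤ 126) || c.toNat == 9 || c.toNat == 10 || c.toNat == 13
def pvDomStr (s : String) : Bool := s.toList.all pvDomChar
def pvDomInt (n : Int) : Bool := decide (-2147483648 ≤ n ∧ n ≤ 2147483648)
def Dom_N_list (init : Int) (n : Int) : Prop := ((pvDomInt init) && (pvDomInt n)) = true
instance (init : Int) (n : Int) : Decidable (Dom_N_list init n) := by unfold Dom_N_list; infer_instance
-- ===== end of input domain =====

-- B replaces A's accumulator-doubling while-loop by a closed-form per-index power (idiomatic).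

-- ===== PORT A =====
-- while i < n: z = 2*init; init = z; N.append(z); i += 1
def N_list_loop (init : Int) (i : Int) (n : Int) : List Int :=
  if h : i < n then
    (2 * init) :: N_list_loop (2 * init) (i + 1) n
  else []
termination_by (n - i).toNat
decreasing_by omega

def N_list (init : Int) (n : Int) : List Int := N_list_loop init 0 n

-- ===== PORT B =====
-- 'init << (i+1)' on Python ints is exactly multiplication by 2^(i+1) (arithmetic shift)
def N_list_alt (init : Int) (n : Int) : List Int :=
  (PySem.List.pyRange 0 n 1).map (fun i => init * 2 ^ (i + 1).toNat)

-- ===== PRECONDITION & SPEC =====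
def Spec_N_list (init : Int) (n : Int) (out : List Int) : Prop := out = N_list_alt init n
instance (init : Int) (n : Int) (out : List Int) : Decidable (Spec_N_list init n out) := by unfold Spec_N_list; infer_instance

-- ===== CLAIM =====
def Claim_equal_N_list : Prop := ∀ (init : Int) (n : Int), Dom_N_list init n → Spec_N_list init n (N_list init n)

-- ===== LEMMAS AND PROOFS =====
theorem N_list_loop_eq (n : Int) : ∀ (fuel : Nat) (init i : Int), (n - i).toNat = fuel →
    N_list_loop init i n = (PySem.List.pyRange i n 1).map (fun j => init * 2 ^ (j - i + 1).toNat) := by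
  intro fuel
  induction fuel with
  | zero =>
    intro init i hf
    rw [N_list_loop, PySem.List.pyRange_one_eq_nil (by omega)]
    simp [show ¬ i < n by omega]
  | succ k ih =>
    intro init i hf
    by_cases h : i < n
    · rw [N_list_loop, dif_pos h, PySem.List.pyRange_one_cons h, List.map_cons,
        ih (2 * init) (i + 1) (by omega)]
      congr 1
      · simp; ring
      · apply List.map_congr_left
        intro j hj
        rw [PySem.List.mem_pyRange_one] at hj
        have h1 : (j - (i + 1) + 1).toNat + 1 = (j - i + 1).toNat := by omega
        rw [← h1, pow_succ]
        ring
    · rw [N_list_loop, dif_neg h, PySem.List.pyRange_one_eq_nil (by omega)]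
      simp

-- ===== VERDICT =====
theorem N_list_spec : Claim_equal_N_list := by
  intro init n _
  unfold Spec_N_list N_list N_list_alt
  rw [N_list_loop_eq n (n - 0).toNat init 0 rfl]
  simp
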